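-- pv_equiv track=rewrite | github.com/shobrook/rebound | env/lib/python3.5/site-packages/urwid/util.py | rle_get_at
-- ===== SOURCE A (Python) =====
-- def rle_get_at( rle, pos ):
--     """
--     Return the attribute at offset pos.
--     """
--     x = 0
--     if pos < 0:
--         return None
--     for a, run in rle:
--         if x+run > pos:
--             return a
--         x += run
--     return None
-- ===== SOURCE B (Python) =====
-- def rle_get_at(rle, pos):
--     """
--     Return the attribute at offset pos.
--     """
--     if pos < 0:
--         return None
--     ends = []
--     total = 0
--     for _, run in rle:
--         total += run
--         ends.append(total)
--     return next((a for (a, _), end in zip(rle, ends) if end > pos), None)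
-- ===== Notes on version B (the rewrite author's own statement) =====
-- stated objective: alternative
-- what changed: B first materialises the full cumulative-end table of the runs (no early exit, accumulator-free query), then answers the query as a first-match search over the zipped (entry, cumulative end) table, instead of A's single scan that interleaves accumulation with the comparison and returns early.
import Mathlib
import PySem

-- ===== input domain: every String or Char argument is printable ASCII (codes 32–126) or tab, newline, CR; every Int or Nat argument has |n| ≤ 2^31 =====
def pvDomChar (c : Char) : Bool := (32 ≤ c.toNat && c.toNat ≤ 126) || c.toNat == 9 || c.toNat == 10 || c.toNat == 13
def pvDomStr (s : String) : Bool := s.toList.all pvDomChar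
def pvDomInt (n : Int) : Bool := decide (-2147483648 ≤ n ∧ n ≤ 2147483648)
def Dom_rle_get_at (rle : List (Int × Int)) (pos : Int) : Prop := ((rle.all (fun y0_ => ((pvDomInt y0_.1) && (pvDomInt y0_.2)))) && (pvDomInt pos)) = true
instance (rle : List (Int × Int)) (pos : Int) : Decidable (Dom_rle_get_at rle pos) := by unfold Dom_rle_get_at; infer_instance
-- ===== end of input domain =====

-- B replaces A's interleaved accumulate-and-compare scan by: build the full cumulative-end
-- table first, then answer with a first-match search over the zipped table (alternative decomposition).
-- ===== PORT A =====
-- the 'for a, run in rle' loop with running accumulator x and early return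
def rleGetAtLoop (pos : Int) : List (Int × Int) → Int → Option Int
  | [], _ => none
  | (a, run) :: rest, x => if x + run > pos then some a else rleGetAtLoop pos rest (x + run)

def rle_get_at (rle : List (Int × Int)) (pos : Int) : Option Int :=
  if pos < 0 then none else rleGetAtLoop pos rle 0

-- ===== PORT B =====
-- the table-building loop: 'total += run; ends.append(total)' over the runs, starting from total
def rleEnds (total : Int) : List Int → List Int
  | [] => []
  | run :: rest => (total + run) :: rleEnds (total + run) rest

def rle_get_at_alt (rle : List (Int × Int)) (pos : Int) : Option Int :=
  if pos < 0 then none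
  else
    let ends := rleEnds 0 (rle.map Prod.snd)
    ((rle.zip ends).find? (fun p => p.2 > pos)).map (fun p => p.1.1)

-- ===== PRECONDITION & SPEC =====
def Spec_rle_get_at (rle : List (Int × Int)) (pos : Int) (out : Option Int) : Prop := out = rle_get_at_alt rle pos
instance (rle : List (Int × Int)) (pos : Int) (out : Option Int) : Decidable (Spec_rle_get_at rle pos out) := by unfold Spec_rle_get_at; infer_instance

-- ===== CLAIM (what is proved, stated in full; the proofs are below) =====
def Claim_equal_rle_get_at : Prop := ∀ (rle : List (Int × Int)) (pos : Int), Dom_rle_get_at rle pos → Spec_rle_get_at rle pos (rle_get_at rle pos)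

-- ===== LEMMAS AND PROOFS =====
theorem loop_eq_find (pos : Int) (rle : List (Int × Int)) (x : Int) :
    rleGetAtLoop pos rle x
      = ((rle.zip (rleEnds x (rle.map Prod.snd))).find? (fun p => p.2 > pos)).map (fun p => p.1.1) := by
  induction rle generalizing x with
  | nil => simp [rleGetAtLoop, rleEnds]
  | cons hd tl ih =>
    obtain ⟨a, run⟩ := hd
    simp only [rleGetAtLoop, rleEnds, List.map_cons, List.zip_cons_cons, List.find?_cons]
    by_cases h : x + run > pos
    · simp [h]
    · simp [h, ih (x + run)]

-- ===== VERDICT (by name: the statement is the Claim_ definition above) =====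
theorem rle_get_at_spec : Claim_equal_rle_get_at := by
  intro rle pos _
  unfold Spec_rle_get_at rle_get_at rle_get_at_alt
  by_cases h : pos < 0
  · simp [h]
  · simp [h, loop_eq_find]
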